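-- pv_equiv track=rewrite | github.com/pypi-data/pypi-mirror-401 | packages/primfunctions/primfunctions-0.1.71.tar.gz/primfunctions-0.1.71/primfunctions/utils/errors.py | _find_user_code_lines
-- ===== SOURCE A (Python) =====
-- def _find_user_code_lines(tb_lines):
--     """Find all user code lines in traceback, returning (deepest, latest)."""
--     user_lines = []
--
--     for i, line in enumerate(tb_lines):
--         # Check for both production (/app/modules/) and local development paths
--         is_user_code = (
--             ("/app/modules/" in line or "/modules/" in line)
--             and 'File "' in line
--             and not any(
--                 exclude in line
--                 for exclude in [
--                     ".venv/",
--                     "site-packages/",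
--                     "dist-packages/",
--                     "/usr/lib/python",
--                     "/usr/local/lib/python",
--                 ]
--             )
--         )
--
--         if is_user_code:
--             # Get the problematic code if available
--             problematic_code = None
--             if (
--                 i + 1 < len(tb_lines)
--                 and tb_lines[i + 1].strip()
--                 and not tb_lines[i + 1].startswith("File")
--             ):
--                 problematic_code = tb_lines[i + 1].strip()
--
--             user_lines.append((line, problematic_code))
--
--     if not user_lines:
--         return None, None
--
--     # Return (deepest/last, latest/first)
--     # In traceback: first entry = outermost/latest, last entry = innermost/deepest
--     return user_lines[-1], user_lines[0]
-- ===== SOURCE B (Python) =====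
-- _EXCLUDES = [".venv/", "site-packages/", "dist-packages/", "/usr/lib/python", "/usr/local/lib/python"]
--
--
-- def _is_user_code(line):
--     return (
--         ("/app/modules/" in line or "/modules/" in line)
--         and 'File "' in line
--         and not any(exclude in line for exclude in _EXCLUDES)
--     )
--
--
-- def _entry(tb_lines, i):
--     line = tb_lines[i]
--     code = None
--     if i + 1 < len(tb_lines):
--         nxt = tb_lines[i + 1]
--         if nxt.strip() and not nxt.startswith("File"):
--             code = nxt.strip()
--     return (line, code)
--
--
-- def _find_user_code_lines(tb_lines):
--     """Find user code lines by two targeted index scans instead of building the full list."""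
--     first = next((i for i in range(len(tb_lines)) if _is_user_code(tb_lines[i])), None)
--     if first is None:
--         return None, None
--     last = next(i for i in range(len(tb_lines) - 1, -1, -1) if _is_user_code(tb_lines[i]))
--     return _entry(tb_lines, last), _entry(tb_lines, first)
-- ===== Notes on version B (the rewrite author's own statement) =====
-- stated objective: simpler
-- what changed: Instead of accumulating the full list of matching (line, code) pairs and indexing [-1]/[0], B finds just the first matching index by a forward scan and the last by a backward scan, and builds the two result tuples directly.
import Mathlib
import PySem

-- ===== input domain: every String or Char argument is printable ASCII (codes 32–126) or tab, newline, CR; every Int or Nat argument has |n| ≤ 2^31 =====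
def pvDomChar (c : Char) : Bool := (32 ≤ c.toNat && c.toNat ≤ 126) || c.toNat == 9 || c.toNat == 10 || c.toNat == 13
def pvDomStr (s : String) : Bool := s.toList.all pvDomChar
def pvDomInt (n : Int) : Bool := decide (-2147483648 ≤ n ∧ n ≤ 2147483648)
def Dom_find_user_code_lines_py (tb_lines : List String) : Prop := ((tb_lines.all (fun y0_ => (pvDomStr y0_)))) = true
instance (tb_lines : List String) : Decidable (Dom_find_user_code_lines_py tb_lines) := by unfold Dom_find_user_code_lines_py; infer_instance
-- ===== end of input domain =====

-- B replaces A's accumulation of the full matching list (indexed by [-1]/[0]) with two targeted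
-- index scans (first match forward, last match backward); objective: simpler.

-- ===== PORT A =====
-- literal transliteration of _find_user_code_lines: build user_lines by one pass, then index [-1]/[0]
def find_user_code_lines_py (tb_lines : List String) : (Option (String × Option String)) × (Option (String × Option String)) :=
  let user_lines : List (String × Option String) :=
    (PySem.List.enumerate tb_lines 0).foldl (fun acc p =>
      if ((PySem.Str.isIn "/app/modules/" p.2 || PySem.Str.isIn "/modules/" p.2)
          && PySem.Str.isIn "File \"" p.2
          && !([".venv/", "site-packages/", "dist-packages/", "/usr/lib/python", "/usr/local/lib/python"].any
                (fun ex => PySem.Str.isIn ex p.2))) = true then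
        -- tb_lines[i+1] is only read under the i+1 < len guard, so pyGetD with default "" is exact
        acc ++ [(p.2,
          if (decide (p.1 + 1 < PySem.List.len tb_lines)
              && (PySem.Str.len (PySem.Str.strip (PySem.List.pyGetD tb_lines (p.1 + 1) "")) != 0)
              && !PySem.Str.startswith (PySem.List.pyGetD tb_lines (p.1 + 1) "") "File") = true
           then some (PySem.Str.strip (PySem.List.pyGetD tb_lines (p.1 + 1) ""))
           else none)]
      else acc) []
  if user_lines = [] then (none, none)
  else (PySem.List.pyGet? user_lines (-1), PySem.List.pyGet? user_lines 0)

-- ===== PORT B =====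
def pvIsUserCode (line : String) : Bool :=
  (PySem.Str.isIn "/app/modules/" line || PySem.Str.isIn "/modules/" line)
  && PySem.Str.isIn "File \"" line
  && !([".venv/", "site-packages/", "dist-packages/", "/usr/lib/python", "/usr/local/lib/python"].any
        (fun ex => PySem.Str.isIn ex line))

-- _entry: indexing is guarded in Source B (i valid, i+1 read under the bound check), so pyGetD "" is exact
def pvEntry (tb_lines : List String) (i : Int) : String × Option String :=
  (PySem.List.pyGetD tb_lines i "",
    if (decide (i + 1 < PySem.List.len tb_lines)
        && (PySem.Str.len (PySem.Str.strip (PySem.List.pyGetD tb_lines (i + 1) "")) != 0)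
        && !PySem.Str.startswith (PySem.List.pyGetD tb_lines (i + 1) "") "File") = true
     then some (PySem.Str.strip (PySem.List.pyGetD tb_lines (i + 1) ""))
     else none)

def find_user_code_lines_py_alt (tb_lines : List String) : (Option (String × Option String)) × (Option (String × Option String)) :=
  match (PySem.List.pyRange 0 (PySem.List.len tb_lines) 1).find?
          (fun i => pvIsUserCode (PySem.List.pyGetD tb_lines i "")) with
  | none => (none, none)
  | some first =>
    -- the backward next(...) always succeeds (first itself matches); .getD first renders it totally
    let last := ((PySem.List.pyRange (PySem.List.len tb_lines - 1) (-1) (-1)).find?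
          (fun i => pvIsUserCode (PySem.List.pyGetD tb_lines i ""))).getD first
    (some (pvEntry tb_lines last), some (pvEntry tb_lines first))

-- ===== PRECONDITION & SPEC =====
def Spec_find_user_code_lines_py (tb_lines : List String) (out : (Option (String × Option String)) × (Option (String × Option String))) : Prop := out = find_user_code_lines_py_alt tb_lines
instance (tb_lines : List String) (out : (Option (String × Option String)) × (Option (String × Option String))) : Decidable (Spec_find_user_code_lines_py tb_lines out) := by unfold Spec_find_user_code_lines_py; infer_instance

-- ===== CLAIM (what is proved, stated in full; the proofs are below) =====
def Claim_equal_find_user_code_lines_py : Prop := ∀ (tb_lines : List String), Dom_find_user_code_lines_py tb_lines → Spec_find_user_code_lines_py tb_lines (find_user_code_lines_py tb_lines)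

-- ===== LEMMAS AND PROOFS =====

-- A's user_lines is the matching indices of B's predicate, mapped through B's entry builder
theorem pv_user_lines_eq (tb : List String) :
    (PySem.List.enumerate tb 0).foldl (fun acc p =>
      if ((PySem.Str.isIn "/app/modules/" p.2 || PySem.Str.isIn "/modules/" p.2)
          && PySem.Str.isIn "File \"" p.2
          && !([".venv/", "site-packages/", "dist-packages/", "/usr/lib/python", "/usr/local/lib/python"].any
                (fun ex => PySem.Str.isIn ex p.2))) = true then
        acc ++ [(p.2,
          if (decide (p.1 + 1 < PySem.List.len tb)
              && (PySem.Str.len (PySem.Str.strip (PySem.List.pyGetD tb (p.1 + 1) "")) != 0)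
              && !PySem.Str.startswith (PySem.List.pyGetD tb (p.1 + 1) "") "File") = true
           then some (PySem.Str.strip (PySem.List.pyGetD tb (p.1 + 1) ""))
           else none)]
      else acc) [] =
    (((PySem.List.pyRange 0 (PySem.List.len tb) 1).filter
        (fun i => pvIsUserCode (PySem.List.pyGetD tb i ""))).map (pvEntry tb)) := by
  rw [PySem.List.enumerate_eq_map_pyRange tb ""]
  rw [PySem.List.foldl_append_if
      (fun p : Int × String =>
        (PySem.Str.isIn "/app/modules/" p.2 || PySem.Str.isIn "/modules/" p.2)
        && PySem.Str.isIn "File \"" p.2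
        && !([".venv/", "site-packages/", "dist-packages/", "/usr/lib/python", "/usr/local/lib/python"].any
              (fun ex => PySem.Str.isIn ex p.2)))
      (fun p : Int × String =>
        (p.2,
          if (decide (p.1 + 1 < PySem.List.len tb)
              && (PySem.Str.len (PySem.Str.strip (PySem.List.pyGetD tb (p.1 + 1) "")) != 0)
              && !PySem.Str.startswith (PySem.List.pyGetD tb (p.1 + 1) "") "File") = true
           then some (PySem.Str.strip (PySem.List.pyGetD tb (p.1 + 1) ""))
           else none))]
  rw [List.filter_map, List.map_map]
  simp only [List.nil_append, Function.comp_def, pvIsUserCode]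
  rfl

-- last element of a nonempty list via Python index -1
theorem pv_pyGet_neg_one {α : Type} (l : List α) (h : l ≠ []) :
    PySem.List.pyGet? l (-1) = l.getLast? := by
  have hl : 0 < l.length := List.length_pos_iff.mpr h
  simp only [PySem.List.pyGet?, PySem.List.pyIdx?]
  rw [if_neg (by omega), if_pos (by omega)]
  simp [List.getLast?_eq_getElem?]

theorem pv_pyGet_zero {α : Type} (l : List α) (h : l ≠ []) :
    PySem.List.pyGet? l 0 = l.head? := by
  have hl : 0 < l.length := List.length_pos_iff.mpr h
  simp only [PySem.List.pyGet?, PySem.List.pyIdx?]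
  rw [if_pos le_rfl, if_pos (by omega)]
  simp [List.head?_eq_getElem?]

theorem pv_backward_scan (tb : List String) :
    (PySem.List.pyRange (PySem.List.len tb - 1) (-1) (-1)).find?
        (fun i => pvIsUserCode (PySem.List.pyGetD tb i "")) =
    ((PySem.List.pyRange 0 (PySem.List.len tb) 1).filter
        (fun i => pvIsUserCode (PySem.List.pyGetD tb i ""))).getLast? := by
  rw [PySem.List.pyRange_neg_one_eq_reverse]
  have : (-1 : Int) + 1 = 0 := by norm_num
  rw [this, show PySem.List.len tb - 1 + 1 = PySem.List.len tb by ring]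
  rw [← List.head?_filter, List.filter_reverse, List.head?_reverse]

theorem pv_main (tb : List String) :
    find_user_code_lines_py tb = find_user_code_lines_py_alt tb := by
  unfold find_user_code_lines_py find_user_code_lines_py_alt
  rw [pv_user_lines_eq tb, ← List.head?_filter, pv_backward_scan tb]
  generalize ((PySem.List.pyRange 0 (PySem.List.len tb) 1).filter
      (fun i => pvIsUserCode (PySem.List.pyGetD tb i ""))) = L
  cases hL : L.head? with
  | none => simp [List.head?_eq_none_iff.mp hL]
  | some first =>
    have hne : L ≠ [] := by intro h0; rw [h0] at hL; simp at hL
    have hm : L.map (pvEntry tb) ≠ [] := by simpa using hne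
    have hb : L.getLast? = some (L.getLast hne) := List.getLast?_eq_some_getLast hne
    rw [if_neg hm, pv_pyGet_neg_one _ hm, pv_pyGet_zero _ hm, List.getLast?_map,
        List.head?_map, hL, hb]
    simp

-- ===== VERDICT (by name: the statement is the Claim_ definition above) =====
theorem find_user_code_lines_py_spec : Claim_equal_find_user_code_lines_py := by
  intro tb _
  unfold Spec_find_user_code_lines_py
  exact pv_main tb
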